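-- pv_equiv track=rewrite | github.com/SamuelLess/marjapussi | marjapussi/utils.py | allowed_general
-- ===== SOURCE A (Python) =====
-- def allowed_first(cards) -> list:
--     """First player has to play an ace, green or any card."""
--     allowed = [c for c in cards if c[2] == 'A']
--     if not allowed:
--         allowed = [c for c in cards if c[0] == 'g']
--     if not allowed:
--         allowed = cards[:]
--     return allowed
--
-- def allowed_general(trick, cards, sup_col=None, first=False) -> list:
--     if len(trick) == 0 and first:
--         return allowed_first(cards)
--     if not trick:
--         return cards
--     trick_col = trick[0][0]
--     if first:
--         # check for ace
--         if (ace := f"{trick_col}-A") in cards: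
--             return [ace]
--
--     if not (allowed:=[c for c in cards if c[0] == trick_col]):
--         allowed = [c for c in cards if c[0] == sup_col]
--     if (b:=list(filter(lambda card: card == high_card(trick+[card], sup_col=sup_col), allowed))):
--         allowed = b
--     return allowed if allowed else cards
--
-- def high_card(cards, sup_col="") -> str:
--     """Finds highest card in single trick."""
--     if not cards:
--         return None
--     col = cards[0][0]
--     base_col_cards = [card for card in cards if card[0] == col]
--     sup_col_cards = [card for card in cards if card[0] == sup_col]
--     return sup_col_cards[-1] if sup_col_cards else base_col_cards[-1]
--     """#!! also not really nice, there has to be a cleaner way but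
--     for c in cards:
--         if c[0] == col and higher_value(high, c):
--             high = c
--     sup_high = high_card([c for c in cards if c[0] == sup_col]
--                          ) if sup_col != "" and sup_col != col else None
--     return sup_high if not sup_high is None else high"""
-- ===== SOURCE B (Python) =====
-- def allowed_first(cards) -> list:
--     """First player has to play an ace, green or any card."""
--     for pred in (lambda c: c[2] == 'A', lambda c: c[0] == 'g'):
--         sel = [c for c in cards if pred(c)]
--         if sel:
--             return sel
--     return cards[:]
--
-- def allowed_general(trick, cards, sup_col=None, first=False) -> list:
--     if len(trick) == 0 and first:
--         return allowed_first(cards)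
--     if not trick:
--         return cards
--     trick_col = trick[0][0]
--     if first:
--         ace = f"{trick_col}-A"
--         if ace in cards:
--             return [ace]
--     allowed = [c for c in cards if c[0] == trick_col]
--     if not allowed:
--         allowed = [c for c in cards if c[0] == sup_col]
--     # a candidate wins the trick iff it is trump, or nothing in the trick is trump
--     # and it follows the led colour (high_card is positional: last matching card wins)
--     trick_has_sup = any(c[0] == sup_col for c in trick)
--     b = [c for c in allowed if c[0] == sup_col or (not trick_has_sup and c[0] == trick_col)]
--     if b:
--         allowed = b
--     return allowed if allowed else cards
-- ===== Notes on version B (the rewrite author's own statement) =====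
-- stated objective: faster
-- what changed: The per-candidate call to high_card over trick+[card] is replaced by one precomputed flag (does the trick contain a trump card?) and a direct boolean test per candidate, dropping the high_card helper and its repeated filter passes over the trick.
-- outside the precondition, e.g. on allowed_general(['g-A', ''], ['r-7'], None, False): A returns ['r-7'], B raises IndexError
import Mathlib
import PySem

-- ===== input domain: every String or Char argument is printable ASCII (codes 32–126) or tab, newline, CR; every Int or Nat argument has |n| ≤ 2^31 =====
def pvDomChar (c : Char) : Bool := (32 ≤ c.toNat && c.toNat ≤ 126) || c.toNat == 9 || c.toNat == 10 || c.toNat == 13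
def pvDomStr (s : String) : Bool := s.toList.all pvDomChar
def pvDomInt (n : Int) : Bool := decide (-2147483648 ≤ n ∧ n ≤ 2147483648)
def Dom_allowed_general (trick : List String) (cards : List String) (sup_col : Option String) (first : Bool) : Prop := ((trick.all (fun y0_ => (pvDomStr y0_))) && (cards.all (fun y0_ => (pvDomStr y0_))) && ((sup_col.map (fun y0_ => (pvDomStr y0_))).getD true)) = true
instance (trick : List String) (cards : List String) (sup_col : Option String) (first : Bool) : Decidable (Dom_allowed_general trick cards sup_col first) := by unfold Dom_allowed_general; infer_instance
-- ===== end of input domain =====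

-- B replaces the per-candidate high_card call by a single precomputed trump test (different decomposition, same values);
-- equivalence is about return values only (neither version mutates its arguments).

-- shared character-level helpers (Python c[0] / c[2]; exact whenever the string is long enough, which Pre_ guarantees)
def pvHead (s : String) : Char := s.toList.headD ' '
def pvThird (s : String) : Char := s.toList.getD 2 ' '
-- Python `c[0] == sup_col`: true iff sup_col is exactly the one-character string holding c's first character
def pvSupEq (c : String) (sup : Option String) : Bool :=
  match sup with
  | none => false
  | some s => s.toList == [pvHead c]

-- ===== PORT A =====
def allowed_first_A (cards : List String) : List String :=
  let a := cards.filter (fun c => pvThird c == 'A')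
  let a2 := if a.isEmpty then cards.filter (fun c => pvHead c == 'g') else a
  if a2.isEmpty then cards else a2

def high_card_A (cards : List String) (sup : Option String) : Option String :=
  match cards with
  | [] => none
  | c0 :: _ =>
    let col := pvHead c0
    let base := cards.filter (fun c => pvHead c == col)
    let sups := cards.filter (fun c => pvSupEq c sup)
    if sups.isEmpty then base.getLast? else sups.getLast?

def allowed_general (trick : List String) (cards : List String) (sup_col : Option String) (first : Bool) : List String :=
  if trick.length = 0 && first then allowed_first_A cards
  else if trick.isEmpty then cards
  else
    let trick_col := pvHead (trick.headD "")
    let ace := String.ofList [trick_col, '-', 'A']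
    if first && cards.contains ace then [ace]
    else
      let a0 := cards.filter (fun c => pvHead c == trick_col)
      let allowed := if a0.isEmpty then cards.filter (fun c => pvSupEq c sup_col) else a0
      let b := allowed.filter (fun card => some card == high_card_A (trick ++ [card]) sup_col)
      let allowed2 := if b.isEmpty then allowed else b
      if allowed2.isEmpty then cards else allowed2

-- ===== PORT B =====
def allowed_first_B (cards : List String) : List String :=
  match ([fun c => pvThird c == 'A', fun c => pvHead c == 'g'] : List (String → Bool)).findSome?
      (fun p => let sel := cards.filter p; if sel.isEmpty then none else some sel) with
  | some sel => sel
  | none => cards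

def allowed_general_alt (trick : List String) (cards : List String) (sup_col : Option String) (first : Bool) : List String :=
  match trick with
  | [] => if first then allowed_first_B cards else cards
  | t0 :: _ =>
    let tc := pvHead t0
    let ace := String.ofList [tc, '-', 'A']
    if first && cards.contains ace then [ace]
    else
      let follow := cards.filter (fun c => pvHead c == tc)
      let allowed := if follow.isEmpty then cards.filter (fun c => pvSupEq c sup_col) else follow
      let hasSup := trick.any (fun c => pvSupEq c sup_col)
      let winners := allowed.filter (fun c => pvSupEq c sup_col || (!hasSup && (pvHead c == tc)))
      let allowed' := if winners.isEmpty then allowed else winners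
      if allowed'.isEmpty then cards else allowed'

-- ===== PRECONDITION & SPEC =====
-- Pre_ excludes exactly the inputs where A raises IndexError (a card shorter than 3 chars in the
-- first-trick branch, an empty led card, an empty string among cards/trick read by the filters);
-- on the one excluded-but-returning corner (empty string in the trick tail while the follow/trump
-- filters come up empty) B itself raises, so it stays outside Pre_.
def Pre_allowed_general (trick : List String) (cards : List String) (sup_col : Option String) (first : Bool) : Prop :=
  if trick.isEmpty then (first = true → ∀ c ∈ cards, 3 ≤ c.toList.length)
  else (trick.headD "" ≠ "" ∧
      ((first = true ∧ String.ofList [pvHead (trick.headD ""), '-', 'A'] ∈ cards) ∨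
       ((∀ c ∈ cards, c ≠ "") ∧ (∀ t ∈ trick, t ≠ ""))))
instance (trick : List String) (cards : List String) (sup_col : Option String) (first : Bool) : Decidable (Pre_allowed_general trick cards sup_col first) := by unfold Pre_allowed_general; infer_instance

def pvWitness_allowed_general : List String × List String × Option String × Bool :=
  (["g-A"], ["g-K", "r-7"], some "r", false)

def Spec_allowed_general (trick : List String) (cards : List String) (sup_col : Option String) (first : Bool) (out : List String) : Prop := out = allowed_general_alt trick cards sup_col first
instance (trick : List String) (cards : List String) (sup_col : Option String) (first : Bool) (out : List String) : Decidable (Spec_allowed_general trick cards sup_col first out) := by unfold Spec_allowed_general; infer_instance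

-- ===== CLAIM (what is proved, stated in full; the proofs are below) =====
def Claim_equal_allowed_general : Prop := ∀ (trick : List String) (cards : List String) (sup_col : Option String) (first : Bool), Dom_allowed_general trick cards sup_col first → Pre_allowed_general trick cards sup_col first → Spec_allowed_general trick cards sup_col first (allowed_general trick cards sup_col first)

-- ===== LEMMAS AND PROOFS =====

lemma allowed_first_eq (cards : List String) : allowed_first_A cards = allowed_first_B cards := by
  unfold allowed_first_A allowed_first_B
  simp only [List.findSome?]
  by_cases h1 : (cards.filter (fun c => pvThird c == 'A')).isEmpty <;>
    by_cases h2 : (cards.filter (fun c => pvHead c == 'g')).isEmpty <;>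
    simp [h1, h2]

-- a card wins the trick iff it is trump, or no trump was played and it follows the led colour
-- proofs about high_card_A: the last element of a nonempty list, with its membership
lemma getLast?_spec {l : List String} (h : l ≠ []) :
    ∃ y, l.getLast? = some y ∧ y ∈ l :=
  ⟨l.getLast h, List.getLast?_eq_some_getLast h, List.getLast_mem h⟩

lemma high_card_filter_pred (t0 : String) (ts : List String) (sup : Option String) (card : String) :
    (some card == high_card_A ((t0 :: ts) ++ [card]) sup) =
    (pvSupEq card sup || (!((t0 :: ts).any (fun c => pvSupEq c sup)) && (pvHead card == pvHead t0))) := by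
  rw [List.cons_append]
  unfold high_card_A
  by_cases hc : pvSupEq card sup = true
  · simp [List.filter_append, hc]
    intro _ h2
    exact absurd (h2 card (Or.inr rfl)) (by simp [hc])
  · rw [Bool.not_eq_true] at hc
    by_cases ha : (t0 :: ts).any (fun c => pvSupEq c sup) = true
    · -- a trick card is trump: the high card is a trump card, never the non-trump candidate
      simp [List.filter_append, hc, ha]
      have hne : (List.filter (fun c => pvSupEq c sup) (t0 :: (ts ++ [card]))).isEmpty = false := by
        obtain ⟨x, hx, hpx⟩ := List.any_eq_true.mp ha
        have hmem : x ∈ t0 :: (ts ++ [card]) := by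
          rcases List.mem_cons.mp hx with rfl | hx
          · exact List.mem_cons_self
          · exact List.mem_cons_of_mem _ (List.mem_append_left _ hx)
        rw [List.isEmpty_eq_false_iff]
        exact List.ne_nil_of_mem (List.mem_filter.mpr ⟨hmem, hpx⟩)
      simp only [hne, Bool.false_eq_true, if_false]
      intro heq
      rcases Option.or_eq_some_iff.mp heq.symm with h | ⟨-, h⟩
      · have := List.find?_some h
        rw [hc] at this; exact Bool.false_ne_true this
      · by_cases hp : pvSupEq t0 sup = true
        · rw [if_pos hp] at h
          cases h
          rw [hp] at hc; exact absurd hc (by simp)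
        · rw [if_neg hp] at h; exact absurd h (by simp)
    · rw [Bool.not_eq_true] at ha
      simp [List.filter_append, hc, ha]
      have hemp : (List.filter (fun c => pvSupEq c sup) (t0 :: (ts ++ [card]))).isEmpty = true := by
        rw [List.any_eq_false] at ha
        simp only [List.isEmpty_iff, List.filter_eq_nil_iff]
        intro x hx
        rcases List.mem_cons.mp hx with rfl | hx
        · exact ha x List.mem_cons_self
        · rcases List.mem_append.mp hx with hx | hx
          · exact ha x (List.mem_cons_of_mem _ hx)
          · rcases List.mem_singleton.mp hx with rfl
            simp [hc]
      simp only [hemp, if_true]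
      by_cases hb : pvHead card = pvHead t0
      · have h1 : List.filter (fun c => pvHead c == pvHead t0) [card] = [card] := by simp [hb]
        rw [h1, ← List.cons_append, List.getLast?_concat]
        simp [hb]
      · have h1 : List.filter (fun c => pvHead c == pvHead t0) [card] = [] := by simp [hb]
        rw [h1, List.append_nil]
        simp only [hb, iff_false]
        intro heq
        have hne2 : (t0 :: List.filter (fun c => pvHead c == pvHead t0) ts) ≠ [] := by
          exact List.cons_ne_nil _ _
        obtain ⟨y, hy, hym⟩ := getLast?_spec hne2
        rw [hy] at heq
        cases heq
        rcases List.mem_cons.mp hym with rfl | hym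
        · exact hb rfl
        · exact hb (by simpa using (List.mem_filter.mp hym).2)

lemma main_eq (trick cards : List String) (sup_col : Option String) (first : Bool) :
    allowed_general trick cards sup_col first = allowed_general_alt trick cards sup_col first := by
  cases trick with
  | nil => cases first <;> simp [allowed_general, allowed_general_alt, allowed_first_eq]
  | cons t0 ts =>
    have hfilt : ∀ l : List String,
        l.filter (fun card => some card == high_card_A (t0 :: (ts ++ [card])) sup_col) =
        l.filter (fun c => pvSupEq c sup_col ||
          (!((t0 :: ts).any (fun c => pvSupEq c sup_col)) && (pvHead c == pvHead t0))) := by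
      intro l
      apply List.filter_congr
      intro x _
      exact high_card_filter_pred t0 ts sup_col x
    unfold allowed_general allowed_general_alt
    simp only [List.cons_append, hfilt, List.length_cons, List.isEmpty_cons, List.headD_cons,
      Nat.succ_ne_zero, decide_false, Bool.false_and, Bool.false_eq_true, if_false]

-- ===== VERDICT (by name: the statement is the Claim_ definition above) =====
theorem allowed_general_spec : Claim_equal_allowed_general := by
  intro trick cards sup_col first _ _
  unfold Spec_allowed_general
  exact main_eq trick cards sup_col first
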